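-- pv_equiv track=rewrite | github.com/11844/Python_Projects | Stone Pile.py | stone_pile_game
-- ===== SOURCE A (Python) =====
-- from collections import deque
--
-- def stone_pile_game(test_cases):
--     results = []
--     for A in test_cases:
--         pile = deque(A)
--         aman_turn = True
--
--         while len(pile) > 1:
--             if aman_turn:
--                 pile.append(pile.popleft())  # move 1
--                 pile.popleft()               # move 2
--             else:
--                 pile.append(pile.popleft())  # move 1
--                 pile.append(pile.popleft())  # move 1
--                 pile.popleft()               # move 2
--             aman_turn = not aman_turn
--
--         last_player = 0 if aman_turn else 1
--         results.append((last_player, pile[0]))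
--     return results
-- ===== SOURCE B (Python) =====
-- def stone_pile_game(test_cases):
--     def solve(A):
--         pile = list(A)
--         pos = 0
--         step = 1
--         while len(pile) > 1:
--             pos = (pos + step) % len(pile)
--             pile.pop(pos)
--             pos %= len(pile)
--             step = 3 - step
--         return ((len(A) - 1) % 2, pile[0])
--     return [solve(A) for A in test_cases]
-- ===== Notes on version B (the rewrite author's own statement) =====
-- stated objective: simpler
-- what changed: Replaces the deque rotate-and-pop simulation (rotating the whole pile each round) by a plain list plus a running front index: each round computes the kill position with modular arithmetic and removes one element with pile.pop(k); the last-player parity is computed directly as (len(A)-1) % 2 instead of toggling a flag.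
import Mathlib
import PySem

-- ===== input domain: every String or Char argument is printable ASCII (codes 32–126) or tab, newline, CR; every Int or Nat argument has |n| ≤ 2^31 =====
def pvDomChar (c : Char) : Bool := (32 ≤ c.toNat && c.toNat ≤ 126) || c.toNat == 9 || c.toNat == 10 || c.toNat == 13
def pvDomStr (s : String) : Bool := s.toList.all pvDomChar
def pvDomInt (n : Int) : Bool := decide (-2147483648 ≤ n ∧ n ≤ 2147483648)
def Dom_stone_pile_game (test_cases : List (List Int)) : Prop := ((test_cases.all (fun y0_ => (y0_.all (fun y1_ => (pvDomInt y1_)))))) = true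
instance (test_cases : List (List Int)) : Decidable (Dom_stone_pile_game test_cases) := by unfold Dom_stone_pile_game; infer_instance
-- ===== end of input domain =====

-- B replaces A's deque rotate-and-pop simulation by a plain list with modular index
-- arithmetic (one pop by index per round); objective: simpler, same O(n^2) cost.

-- ===== PORT A =====
-- A's while-loop: Aman's round rotates once then pops the front; the other round
-- rotates twice then pops the front. One stone is removed per round, so fuel =
-- initial pile length bounds the rounds (structural recursion on the fuel).
def stoneLoopA : Nat → List Int → Bool → Bool × List Int
  | fuel + 1, a :: b :: rest, turn =>
      if turn then
        stoneLoopA fuel (rest ++ [a]) (!turn)              -- append(popleft); popleft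
      else
        stoneLoopA fuel ((rest ++ [a, b]).tail) (!turn)    -- append(popleft) twice; popleft
  | _, pile, turn => (turn, pile)                           -- len(pile) <= 1: loop exits

def stone_pile_game (test_cases : List (List Int)) : List (Int × Int) :=
  test_cases.foldl (fun results A =>
    let r := stoneLoopA A.length A true
    let last_player : Int := if r.1 then 0 else 1
    -- pile[0]: IndexError when the input pile is empty — excluded by Pre_
    results ++ [(last_player, PySem.List.pyGetD r.2 0 0)]) []

-- ===== PORT B =====
-- B's while-loop: pos points at the current front; each round removes the stone at
-- offset step (1 for Aman, 2 otherwise) past the front with pile.pop(k), then takes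
-- pos modulo the shortened pile's length and flips the step. One stone per round,
-- so fuel = initial pile length bounds the rounds.
def altLoop : Nat → List Int → Nat → Nat → List Int
  | 0, pile, _, _ => pile
  | fuel + 1, pile, pos, step =>
      if pile.length ≤ 1 then pile
      else
        altLoop fuel (pile.eraseIdx ((pos + step) % pile.length))
          (((pos + step) % pile.length) % (pile.eraseIdx ((pos + step) % pile.length)).length)
          (3 - step)

def stone_pile_game_alt (test_cases : List (List Int)) : List (Int × Int) :=
  test_cases.map (fun A =>
    -- pile[0]: IndexError when the input pile is empty — excluded by Pre_
    (PySem.Int.mod ((A.length : Int) - 1) 2, PySem.List.pyGetD (altLoop A.length A 0 1) 0 0))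

-- ===== PRECONDITION & SPEC =====
-- Pre_ excludes empty inner piles: there both programs raise IndexError on pile[0].
def Pre_stone_pile_game (test_cases : List (List Int)) : Prop :=
  test_cases.all (fun A => !A.isEmpty) = true
instance (test_cases : List (List Int)) : Decidable (Pre_stone_pile_game test_cases) := by
  unfold Pre_stone_pile_game; infer_instance

def pvWitness_stone_pile_game : List (List Int) := [[3, 1, 4, 1, 5], [9]]

def Spec_stone_pile_game (test_cases : List (List Int)) (out : List (Int × Int)) : Prop := out = stone_pile_game_alt test_cases
instance (test_cases : List (List Int)) (out : List (Int × Int)) : Decidable (Spec_stone_pile_game test_cases out) := by unfold Spec_stone_pile_game; infer_instance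

-- ===== CLAIM (what is proved, stated in full; the proofs are below) =====
def Claim_equal_stone_pile_game : Prop := ∀ (test_cases : List (List Int)), Dom_stone_pile_game test_cases → Pre_stone_pile_game test_cases → Spec_stone_pile_game test_cases (stone_pile_game test_cases)

-- ===== LEMMAS AND PROOFS =====

-- One elimination round of A, written as "rotate by the step, drop the front".
theorem stoneLoopA_step (fuel : Nat) (d : List Int) (turn : Bool) (h : 2 ≤ d.length) :
    stoneLoopA (fuel + 1) d turn
      = stoneLoopA fuel ((d.rotate (if turn then 1 else 2)).tail) (!turn) := by
  match d with
  | a :: b :: rest =>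
    cases turn <;> simp [stoneLoopA, List.rotate_eq_drop_append_take]

-- One elimination round of B.
theorem altLoop_step (fuel : Nat) (p : List Int) (pos s : Nat) (h : 2 ≤ p.length) :
    altLoop (fuel + 1) p pos s
      = altLoop fuel (p.eraseIdx ((pos + s) % p.length))
          (((pos + s) % p.length) % (p.length - 1)) (3 - s) := by
  have hk : (pos + s) % p.length < p.length := Nat.mod_lt _ (by omega)
  rw [altLoop, if_neg (by omega : ¬ p.length ≤ 1),
      show (p.eraseIdx ((pos + s) % p.length)).length = p.length - 1 by
        simp [List.length_eraseIdx, hk]]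

-- Removing the element after the front of a rotated list = eraseIdx + re-rotation.
theorem tail_rotate_eq (p : List Int) (k : Nat) (h2 : 2 ≤ p.length) (hk : k < p.length) :
    (p.rotate k).tail = (p.eraseIdx k).rotate (k % (p.length - 1)) := by
  have htk : (p.take k).length = k := by simp; omega
  rw [List.rotate_eq_drop_append_take (by omega : k ≤ p.length),
      List.drop_eq_getElem_cons hk, List.eraseIdx_eq_take_drop_succ,
      List.cons_append, List.tail_cons]
  by_cases hlt : k < p.length - 1
  · have hq : k ≤ (p.take k ++ p.drop (k + 1)).length := by simp; omega
    rw [Nat.mod_eq_of_lt hlt, List.rotate_eq_drop_append_take hq,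
        List.drop_left' htk, List.take_left' htk]
  · have hk1 : k = p.length - 1 := by omega
    have hnil : p.drop (k + 1) = [] := List.drop_eq_nil_of_le (by omega)
    rw [hnil, hk1, Nat.mod_self, List.rotate_zero]
    simp

-- Main invariant: A's deque is B's pile rotated to its current front; the final turn
-- alternates with the number of eliminated stones.
theorem loop_agree (n : Nat) : ∀ (p : List Int) (pos : Nat) (turn : Bool),
    p.length = n + 1 → pos < n + 1 →
    stoneLoopA (n + 1) (p.rotate pos) turn
      = ((if n % 2 = 0 then turn else !turn), altLoop (n + 1) p pos (if turn then 1 else 2)) := by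
  induction n with
  | zero =>
    intro p pos turn hlen _
    match p, hlen with
    | [x], _ =>
      rw [List.rotate_singleton]
      simp [stoneLoopA, altLoop]
  | succ n ih =>
    intro p pos turn hlen hpos
    have h2 : 2 ≤ p.length := by omega
    set s : Nat := if turn then 1 else 2 with hs
    set k : Nat := (pos + s) % p.length with hk
    have hklt : k < p.length := Nat.mod_lt _ (by omega)
    have hq : (p.eraseIdx k).length = n + 1 := by
      simp [List.length_eraseIdx, hklt]; omega
    have hstep : (if !turn then 1 else 2) = 3 - s := by cases turn <;> simp [hs]
    -- A's side: one round, then the invariant for the shorter pile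
    rw [stoneLoopA_step _ _ _ (by rw [List.length_rotate]; omega), ← hs,
        List.rotate_rotate, ← List.rotate_mod, ← hk,
        tail_rotate_eq p k h2 hklt,
        ih (p.eraseIdx k) (k % (p.length - 1)) (!turn) hq
          (by have := Nat.mod_lt k (show 0 < p.length - 1 by omega); omega),
        hstep]
    -- B's side: one round
    rw [altLoop_step _ p pos s h2, ← hk]
    congr 1
    -- turn bookkeeping: parity flips with each round
    rcases Nat.even_or_odd n with he | ho
    · have h1 : n % 2 = 0 := Nat.even_iff.mp he
      have h2' : (n + 1) % 2 = 1 := by omega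
      simp [h1, h2']
    · have h1 : n % 2 = 1 := Nat.odd_iff.mp ho
      have h2' : (n + 1) % 2 = 0 := by omega
      simp [h1, h2']

-- The two per-pile results agree on a nonempty pile.
theorem pile_agree (A : List Int) (hA : A ≠ []) :
    (let r := stoneLoopA A.length A true
     let last_player : Int := if r.1 then 0 else 1
     ((last_player, PySem.List.pyGetD r.2 0 0) : Int × Int))
      = (PySem.Int.mod ((A.length : Int) - 1) 2,
         PySem.List.pyGetD (altLoop A.length A 0 1) 0 0) := by
  obtain ⟨n, hn⟩ : ∃ n, A.length = n + 1 :=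
    ⟨A.length - 1, by have := List.length_pos_of_ne_nil hA; omega⟩
  have hmain := loop_agree n A 0 true hn (by omega)
  rw [List.rotate_zero] at hmain
  rw [hn]
  simp only [hmain, Prod.mk.injEq]
  refine ⟨?_, rfl⟩
  rw [PySem.Int.mod_eq_emod_of_pos (show (0:Int) < 2 by omega)]
  by_cases hp : n % 2 = 0
  · simp [hp]; omega
  · simp [hp]; omega

-- ===== VERDICT (by name: the statement is the Claim_ definition above) =====
theorem stone_pile_game_spec : Claim_equal_stone_pile_game := by
  intro test_cases _ hpre
  unfold Spec_stone_pile_game stone_pile_game stone_pile_game_alt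
  rw [PySem.List.foldl_append_singleton_eq_map, List.nil_append]
  refine List.map_congr_left (fun A hmem => pile_agree A ?_)
  have := List.all_eq_true.mp hpre A hmem
  simpa [List.isEmpty_iff] using this
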